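-- pv_equiv track=rewrite | github.com/CHOVB/omok-claw | apps/web/public/agents/daemon_agent.py | blocking_threat_score
-- ===== SOURCE A (Python) =====
-- BOARD_SIZE = 15
--
-- DIRECTIONS = ((1, 0), (0, 1), (1, 1), (1, -1))
--
-- def in_bounds(x, y):
--     return 0 <= x < BOARD_SIZE and 0 <= y < BOARD_SIZE
--
-- def count_one_side(board, x, y, dx, dy, color):
--     length = 0
--     cx = x + dx
--     cy = y + dy
--     while in_bounds(cx, cy) and board[cy][cx] == color:
--         length += 1
--         cx += dx
--         cy += dy
--     open_end = in_bounds(cx, cy) and board[cy][cx] is None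
--     return length, open_end
--
-- def blocking_threat_score(board, x, y, opponent_color):
--     score = 0
--     for dx, dy in DIRECTIONS:
--         left, left_open = count_one_side(board, x, y, -dx, -dy, opponent_color)
--         right, right_open = count_one_side(board, x, y, dx, dy, opponent_color)
--         span = left + right
--         open_ends = int(left_open) + int(right_open)
--         if span >= 4:
--             score += 12000
--         elif span == 3:
--             score += 2500 if open_ends >= 1 else 500
--         elif span == 2 and open_ends == 2:
--             score += 300
--     return score
-- ===== SOURCE B (Python) =====
-- # B: instead of pointer-walking each side with bounds checks interleaved (A's
-- # count_one_side), materialize each ray as a 16-cell array with an OOB sentinel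
-- # (safe against ragged/short boards, where A would raise IndexError), then take
-- # the run length and open-end flag by a pure scan over that array.
-- BOARD_SIZE = 15
--
-- DIRECTIONS = ((1, 0), (0, 1), (1, 1), (1, -1))
--
-- _OOB = object()  # sentinel: out of the 15x15 board, or missing in the ragged list
--
-- def _run_and_open(cells, color):
--     n = 0
--     for v in cells:
--         if v != color:
--             break
--         n += 1
--     return n, cells[n] is None
--
-- def blocking_threat_score(board, x, y, opponent_color):
--     def cell(cx, cy):
--         if 0 <= cx < BOARD_SIZE and 0 <= cy < BOARD_SIZE and cy < len(board) and cx < len(board[cy]):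
--             return board[cy][cx]
--         return _OOB
--
--     score = 0
--     for dx, dy in DIRECTIONS:
--         left_cells = [cell(x - k * dx, y - k * dy) for k in range(1, 17)]
--         right_cells = [cell(x + k * dx, y + k * dy) for k in range(1, 17)]
--         left, left_open = _run_and_open(left_cells, opponent_color)
--         right, right_open = _run_and_open(right_cells, opponent_color)
--         span = left + right
--         open_ends = int(left_open) + int(right_open)
--         if span >= 4:
--             score += 12000
--         elif span == 3:
--             score += 2500 if open_ends >= 1 else 500
--         elif span == 2 and open_ends == 2:
--             score += 300
--     return score
-- ===== Notes on version B (the rewrite author's own statement) =====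
-- stated objective: alternative
-- what changed: A walks pointers outward per side with bounds checks and board indexing interleaved (count_one_side); B first materializes each 16-cell ray as an explicit array with an out-of-bounds sentinel (via a length-guarded cell lookup) and then gets run length and open-end flag by a pure scan of that array, applying the same scoring table.
import Mathlib
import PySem

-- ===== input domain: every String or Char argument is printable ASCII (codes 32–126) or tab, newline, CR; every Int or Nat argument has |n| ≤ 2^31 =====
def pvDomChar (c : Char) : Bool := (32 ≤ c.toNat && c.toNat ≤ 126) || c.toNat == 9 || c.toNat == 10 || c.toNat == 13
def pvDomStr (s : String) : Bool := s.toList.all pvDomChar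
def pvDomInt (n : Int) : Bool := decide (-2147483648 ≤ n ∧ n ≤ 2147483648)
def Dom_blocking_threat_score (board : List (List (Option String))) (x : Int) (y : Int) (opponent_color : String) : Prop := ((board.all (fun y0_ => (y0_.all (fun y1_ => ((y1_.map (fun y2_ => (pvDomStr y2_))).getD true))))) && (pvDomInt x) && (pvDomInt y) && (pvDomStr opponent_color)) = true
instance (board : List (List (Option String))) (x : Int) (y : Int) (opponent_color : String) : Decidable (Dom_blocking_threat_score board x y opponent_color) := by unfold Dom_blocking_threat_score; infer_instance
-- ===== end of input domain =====

-- B builds each 16-cell ray as an explicit sentinel array and then scans it, instead of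
-- A's pointer walk; B is total on ragged boards where Python A raises IndexError.

-- ===== PORT A =====
-- in_bounds(x, y)
def inB (cx cy : Int) : Bool :=
  decide (0 ≤ cx) && decide (cx < 15) && decide (0 ≤ cy) && decide (cy < 15)

-- board[cy][cx] as a lookup: none = IndexError (A raises there; excluded by Pre_)
def cellAt (board : List (List (Option String))) (cx cy : Int) : Option (Option String) :=
  match PySem.List.pyGet? board cy with
  | none => none
  | some row => PySem.List.pyGet? row cx

-- the while loop of count_one_side; fuel 16 is never exhausted, since the 15×15 bound
-- admits at most 15 consecutive in-bounds cells on a ray, so the loop runs ≤ 15 times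
def cosAux (board : List (List (Option String))) (dx dy : Int) (color : String) :
    Nat → Int → Int → Int → Int × Bool
  | 0, _, _, len => (len, false)
  | f + 1, cx, cy, len =>
    if inB cx cy && (cellAt board cx cy == some (some color)) then
      cosAux board dx dy color f (cx + dx) (cy + dy) (len + 1)
    else
      (len, inB cx cy && (cellAt board cx cy == some none))

def count_one_side (board : List (List (Option String))) (x y dx dy : Int) (color : String) :
    Int × Bool :=
  cosAux board dx dy color 16 (x + dx) (y + dy) 0

-- body of A's for-loop over DIRECTIONS (score += …)
def dirScoreA (board : List (List (Option String))) (x y : Int) (color : String)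
    (d : Int × Int) : Int :=
  let l := count_one_side board x y (-d.1) (-d.2) color
  let r := count_one_side board x y d.1 d.2 color
  let span := l.1 + r.1
  let openEnds := (if l.2 then (1 : Int) else 0) + (if r.2 then (1 : Int) else 0)
  if span ≥ 4 then 12000
  else if span = 3 then (if openEnds ≥ 1 then 2500 else 500)
  else if span = 2 ∧ openEnds = 2 then 300
  else 0

def blocking_threat_score (board : List (List (Option String))) (x : Int) (y : Int)
    (opponent_color : String) : Int :=
  ([((1 : Int), (0 : Int)), (0, 1), (1, 1), (1, -1)] : List (Int × Int)).foldl
    (fun score d => score + dirScoreA board x y opponent_color d) 0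

-- ===== PORT B =====
-- B's cell(cx, cy): the 'cy < len(board) and cx < len(board[cy])' guards are exactly the
-- in-range test pyGet? performs for a nonnegative index, so the guarded lookup is cellAt;
-- none models the _OOB sentinel
def safeCell (board : List (List (Option String))) (cx cy : Int) : Option (Option String) :=
  if inB cx cy then cellAt board cx cy else none

-- the for/break counting loop of _run_and_open
def runLen (color : String) : List (Option (Option String)) → Nat
  | [] => 0
  | v :: r => if v == some (some color) then runLen color r + 1 else 0

-- _run_and_open(cells, color): (n, cells[n] is None)
def run_and_open (cells : List (Option (Option String))) (color : String) : Int × Bool :=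
  let n := runLen color cells
  ((n : Int), PySem.List.pyGet? cells (n : Int) == some (some none))

-- body of B's for-loop over DIRECTIONS
def dirScoreB (board : List (List (Option String))) (x y : Int) (color : String)
    (d : Int × Int) : Int :=
  let leftCells := (PySem.List.pyRange 1 17 1).map (fun k => safeCell board (x - k * d.1) (y - k * d.2))
  let rightCells := (PySem.List.pyRange 1 17 1).map (fun k => safeCell board (x + k * d.1) (y + k * d.2))
  let l := run_and_open leftCells color
  let r := run_and_open rightCells color
  let span := l.1 + r.1
  let openEnds := (if l.2 then (1 : Int) else 0) + (if r.2 then (1 : Int) else 0)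
  if span ≥ 4 then 12000
  else if span = 3 then (if openEnds ≥ 1 then 2500 else 500)
  else if span = 2 ∧ openEnds = 2 then 300
  else 0

def blocking_threat_score_alt (board : List (List (Option String))) (x : Int) (y : Int)
    (opponent_color : String) : Int :=
  ([((1 : Int), (0 : Int)), (0, 1), (1, 1), (1, -1)] : List (Int × Int)).foldl
    (fun score d => score + dirScoreB board x y opponent_color d) 0

-- ===== PRECONDITION & SPEC =====
-- Pre_ excludes exactly the inputs on which Python A raises IndexError: along some ray,
-- the walk over in-bounds cells equal to opponent_color reaches an in-bounds coordinate
-- that is missing from the (ragged or short) board list.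
def Pre_blocking_threat_score (board : List (List (Option String))) (x : Int) (y : Int) (opponent_color : String) : Prop :=
  ∀ d ∈ ([(1, 0), (0, 1), (1, 1), (1, -1), (-1, 0), (0, -1), (-1, -1), (-1, 1)] : List (Int × Int)),
    ∀ k ∈ List.range 15,
      (∀ j ∈ List.range k,
          inB (x + ((j : Int) + 1) * d.1) (y + ((j : Int) + 1) * d.2) = true ∧
          cellAt board (x + ((j : Int) + 1) * d.1) (y + ((j : Int) + 1) * d.2) = some (some opponent_color)) →
      inB (x + ((k : Int) + 1) * d.1) (y + ((k : Int) + 1) * d.2) = true →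
      cellAt board (x + ((k : Int) + 1) * d.1) (y + ((k : Int) + 1) * d.2) ≠ none

instance (board : List (List (Option String))) (x : Int) (y : Int) (opponent_color : String) : Decidable (Pre_blocking_threat_score board x y opponent_color) := by unfold Pre_blocking_threat_score; infer_instance

def pvWitness_blocking_threat_score : List (List (Option String)) × Int × Int × String :=
  ([[some "B", none, some "W"], [none, some "B", none]], 1, 20, "B")

def Spec_blocking_threat_score (board : List (List (Option String))) (x : Int) (y : Int) (opponent_color : String) (out : Int) : Prop := out = blocking_threat_score_alt board x y opponent_color
instance (board : List (List (Option String))) (x : Int) (y : Int) (opponent_color : String) (out : Int) : Decidable (Spec_blocking_threat_score board x y opponent_color out) := by unfold Spec_blocking_threat_score; infer_instance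

-- ===== CLAIM (what is proved, stated in full; the proofs are below) =====
def Claim_equal_blocking_threat_score : Prop := ∀ (board : List (List (Option String))) (x : Int) (y : Int) (opponent_color : String), Dom_blocking_threat_score board x y opponent_color → Pre_blocking_threat_score board x y opponent_color → Spec_blocking_threat_score board x y opponent_color (blocking_threat_score board x y opponent_color)


-- ===== LEMMAS AND PROOFS =====

-- proof-side view of B's ray array, built cell by cell from the start of the walk
def cellsFrom (board : List (List (Option String))) (dx dy : Int) :
    Nat → Int → Int → List (Option (Option String))
  | 0, _, _ => []
  | n + 1, cx, cy => safeCell board cx cy :: cellsFrom board dx dy n (cx + dx) (cy + dy)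

theorem safeCell_beq (board : List (List (Option String))) (cx cy : Int) (v : Option String) :
    (safeCell board cx cy == some v) = (inB cx cy && (cellAt board cx cy == some v)) := by
  unfold safeCell
  by_cases h : inB cx cy = true <;> simp [h]

theorem open_head (board : List (List (Option String))) (cx cy : Int) :
    (inB cx cy && (cellAt board cx cy == some none)) =
      (some (safeCell board cx cy) == some (some (none : Option String))) := by
  unfold safeCell
  by_cases h : inB cx cy = true <;> simp [h]

theorem cos_run (board : List (List (Option String))) (dx dy : Int) (color : String) :
    ∀ (n : Nat) (cx cy : Int) (acc : Int),
      cosAux board dx dy color n cx cy acc =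
        (acc + (runLen color (cellsFrom board dx dy n cx cy) : Int),
         PySem.List.pyGet? (cellsFrom board dx dy n cx cy)
             ((runLen color (cellsFrom board dx dy n cx cy) : Nat) : Int) == some (some none)) := by
  intro n
  induction n with
  | zero =>
      intro cx cy acc
      simp [cosAux, cellsFrom, runLen, PySem.List.pyGet?]
  | succ m ih =>
      intro cx cy acc
      by_cases h : (inB cx cy && (cellAt board cx cy == some (some color))) = true
      · have hhd : (safeCell board cx cy == some (some color)) = true := by
          rw [safeCell_beq]; exact h
        simp only [cosAux, h, if_pos, cellsFrom, runLen, hhd]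
        rw [ih]
        simp only [Prod.mk.injEq]
        refine ⟨by push_cast; ring, ?_⟩
        rw [PySem.List.pyGet?_natCast, PySem.List.pyGet?_natCast]
        simp
      · have hhd : (safeCell board cx cy == some (some color)) = false := by
          rw [safeCell_beq]; simpa using h
        simp only [cosAux, h, if_neg, Bool.false_eq_true, not_false_iff, cellsFrom, runLen, hhd,
          Bool.false_eq_true]
        simp only [Prod.mk.injEq]
        refine ⟨by simp, ?_⟩
        rw [PySem.List.pyGet?_natCast]
        simp only [List.getElem?_cons_zero]
        rw [open_head]

theorem cells_eq (board : List (List (Option String))) (x y dx dy : Int) :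
    (PySem.List.pyRange 1 17 1).map (fun k => safeCell board (x + k * dx) (y + k * dy)) =
      cellsFrom board dx dy 16 (x + dx) (y + dy) := by
  rw [show PySem.List.pyRange 1 17 1 =
      [1, 2, 3, 4, 5, 6, 7, 8, 9, 10, 11, 12, 13, 14, 15, 16] from by decide]
  simp only [List.map, cellsFrom]
  norm_num
  ring_nf
  tauto

theorem ray_eq (board : List (List (Option String))) (x y dx dy : Int) (color : String) :
    count_one_side board x y dx dy color =
      run_and_open ((PySem.List.pyRange 1 17 1).map
        (fun k => safeCell board (x + k * dx) (y + k * dy))) color := by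
  unfold count_one_side run_and_open
  rw [cells_eq, cos_run]
  simp

theorem ray_eq_neg (board : List (List (Option String))) (x y dx dy : Int) (color : String) :
    count_one_side board x y (-dx) (-dy) color =
      run_and_open ((PySem.List.pyRange 1 17 1).map
        (fun k => safeCell board (x - k * dx) (y - k * dy))) color := by
  have hf : (fun k => safeCell board (x - k * dx) (y - k * dy)) =
      (fun k => safeCell board (x + k * (-dx)) (y + k * (-dy))) := by
    funext k; ring_nf
  rw [hf]
  exact ray_eq board x y (-dx) (-dy) color

theorem dirScore_eq (board : List (List (Option String))) (x y : Int) (color : String)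
    (d : Int × Int) : dirScoreA board x y color d = dirScoreB board x y color d := by
  unfold dirScoreA dirScoreB
  rw [ray_eq_neg board x y d.1 d.2 color, ray_eq board x y d.1 d.2 color]

-- ===== VERDICT (by name: the statement is the Claim_ definition above) =====
theorem blocking_threat_score_spec : Claim_equal_blocking_threat_score := by
  intro board x y opponent_color _hDom _hPre
  unfold Spec_blocking_threat_score blocking_threat_score blocking_threat_score_alt
  simp only [List.foldl, dirScore_eq]
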